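-- pv_equiv track=rewrite | github.com/gibi177/vigenere_cipher | CipherBreaker/Kasiski.py | repeated_substrings_positions
-- ===== SOURCE A (Python) =====
-- def repeated_substrings_positions(clean_text: str, substrings_count: dict[str, int]) -> dict[str, list[int]]:
--   result = {} # Dictionary where keys are substrings and values are lists of positions where that substring appears in the text
--
--   for substring, count in substrings_count.items():
--     if count > 1:
--
--       positions = []
--       start_index = 0
--       while True:
--         position = clean_text.find(substring, start_index)
--
--         if position == -1:
--           break
--         else:
--           positions.append(position)
--           start_index = position + 1
--
--       result[substring] = positions # Add entry to the dictionary
--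
--   return result
-- ===== SOURCE B (Python) =====
-- def repeated_substrings_positions(clean_text: str, substrings_count: dict[str, int]) -> dict[str, list[int]]:
--     # Build, for each needed substring length, a sliding-window index
--     # substring -> all (overlapping) positions, then answer every query by lookup.
--     n = len(clean_text)
--     lengths = []
--     for s, c in substrings_count.items():
--         if c > 1 and len(s) not in lengths:
--             lengths.append(len(s))
--     index = {}
--     for L in lengths:
--         for i in range(n - L + 1):
--             index.setdefault(clean_text[i:i + L], []).append(i)
--     result = {}
--     for s, c in substrings_count.items():
--         if c > 1:
--             result[s] = index.get(s, [])
--     return result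
-- ===== Notes on version B (the rewrite author's own statement) =====
-- stated objective: faster
-- what changed: Replaces A's per-substring repeated str.find scan of the whole text by one sliding-window pass per distinct substring length that builds a substring-to-positions index once, after which every queried substring is answered by a single dictionary lookup.
import Mathlib
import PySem

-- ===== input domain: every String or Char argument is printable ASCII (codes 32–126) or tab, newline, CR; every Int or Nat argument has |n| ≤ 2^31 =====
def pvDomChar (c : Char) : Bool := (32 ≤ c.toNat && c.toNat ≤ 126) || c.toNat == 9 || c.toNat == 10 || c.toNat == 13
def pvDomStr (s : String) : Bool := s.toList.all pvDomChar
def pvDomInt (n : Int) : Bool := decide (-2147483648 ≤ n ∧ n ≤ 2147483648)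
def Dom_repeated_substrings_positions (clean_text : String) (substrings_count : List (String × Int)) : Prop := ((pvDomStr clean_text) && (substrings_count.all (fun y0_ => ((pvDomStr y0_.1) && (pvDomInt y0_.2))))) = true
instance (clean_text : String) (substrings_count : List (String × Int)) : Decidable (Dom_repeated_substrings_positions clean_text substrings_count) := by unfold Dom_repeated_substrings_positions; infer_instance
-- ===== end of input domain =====

-- B replaces A's per-substring repeated str.find scan by one sliding-window pass per distinct
-- substring length that builds a substring -> positions index, answering each query by lookup;
-- the return values are proved equal on the whole domain.

-- ===== PORT A =====
-- termination facts for A's `while True: ... find(substring, start_index)` loop (cited in `decreasing_by`)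
theorem pvFindFrom_gt (s sub : List Char) (k : Nat) (h : s.length < k) :
    PySem.Chars.findFrom s sub (k : Int) none = -1 := by
  simp [PySem.Chars.findFrom]
  omega
theorem pvFindFrom_bounds (s sub : List Char) (k : Nat)
    (h : PySem.Chars.findFrom s sub (k : Int) none ≠ -1) :
    (k : Int) ≤ PySem.Chars.findFrom s sub (k : Int) none ∧
      PySem.Chars.findFrom s sub (k : Int) none ≤ s.length := by
  by_cases hk : k ≤ s.length
  · refine ⟨(PySem.Chars.findFrom_natCast_spec s sub k hk h).1, ?_⟩
    rw [PySem.Chars.findFrom_natCast s sub k hk] at h ⊢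
    split at h
    · simp at h
    · rename_i hf
      rw [if_neg hf]
      have := PySem.Chars.find_le_length (s.drop k) sub
      simp at this
      omega
  · exact absurd (pvFindFrom_gt s sub k (by omega)) h
def findLoopA (clean_text substring : String) (start : Nat) : List Int :=
  let position := PySem.Str.findFrom clean_text substring (start : Int) none
  if _h : position = -1 then []
  else position.toNat :: findLoopA clean_text substring (position.toNat + 1)
termination_by clean_text.toList.length + 1 - start
decreasing_by
  have hb := pvFindFrom_bounds clean_text.toList substring.toList start (by simpa [position] using _h)
  have : 0 ≤ position := le_trans (by positivity) hb.1
  simp only [position, PySem.Str.findFrom_eq] at *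
  omega
def repeated_substrings_positions (clean_text : String) (substrings_count : List (String × Int)) : List (String × List Int) :=
  (substrings_count.foldl
    (fun (result : PySem.Dict String (List Int)) p =>
      if p.2 > 1 then result.insert p.1 (findLoopA clean_text p.1 0) else result)
    PySem.Dict.empty).items

-- ===== PORT B =====
def repeated_substrings_positions_alt (clean_text : String) (substrings_count : List (String × Int)) : List (String × List Int) :=
  let n : Int := PySem.Str.len clean_text
  let lengths : PySem.Set Int :=
    substrings_count.foldl
      (fun acc p => if p.2 > 1 then PySem.Set.add acc (PySem.Str.len p.1) else acc)
      PySem.Set.empty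
  let index : PySem.Dict String (List Int) :=
    lengths.foldl
      (fun d L =>
        (PySem.List.pyRange 0 (n - L + 1) 1).foldl
          (fun d i => d.modify (PySem.Str.slice clean_text (some i) (some (i + L))) [] (fun v => v ++ [i]))
          d)
      PySem.Dict.empty
  (substrings_count.foldl
    (fun (r : PySem.Dict String (List Int)) p =>
      if p.2 > 1 then r.insert p.1 (index.getD p.1 []) else r)
    PySem.Dict.empty).items

-- ===== PRECONDITION & SPEC =====
def Spec_repeated_substrings_positions (clean_text : String) (substrings_count : List (String × Int)) (out : List (String × List Int)) : Prop := out = repeated_substrings_positions_alt clean_text substrings_count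
instance (clean_text : String) (substrings_count : List (String × Int)) (out : List (String × List Int)) : Decidable (Spec_repeated_substrings_positions clean_text substrings_count out) := by unfold Spec_repeated_substrings_positions; infer_instance

-- ===== CLAIM (what is proved, stated in full; the proofs are below) =====
def Claim_equal_repeated_substrings_positions : Prop := ∀ (clean_text : String) (substrings_count : List (String × Int)), Dom_repeated_substrings_positions clean_text substrings_count → Spec_repeated_substrings_positions clean_text substrings_count (repeated_substrings_positions clean_text substrings_count)

-- ===== LEMMAS AND PROOFS =====

theorem pvPrefInfix {sub cs : List Char} {k i : Nat} (hki : k ≤ i) (h : sub <+: cs.drop i) : sub <:+: cs.drop k := by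
  have h2 : cs.drop i = (cs.drop k).drop (i - k) := by
    rw [List.drop_drop]; congr 1; omega
  rw [h2] at h
  exact h.isInfix.trans (List.drop_suffix _ _).isInfix

def pvOccFrom (cs sub : List Char) (k : Nat) : List Int :=
  ((List.range (cs.length + 1 - sub.length)).filter
    (fun i => decide (k ≤ i) && decide (sub <+: cs.drop i))).map Int.ofNat

theorem pvOcc_nil {cs sub : List Char} {k : Nat} (h : ¬ sub <:+: cs.drop k) : pvOccFrom cs sub k = [] := by
  unfold pvOccFrom
  rw [List.filter_eq_nil_iff.2, List.map_nil]
  intro i _ hi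
  simp at hi
  exact h (pvPrefInfix hi.1 hi.2)

theorem pvOcc_cons {cs sub : List Char} {k m : Nat} (hkm : k ≤ m) (hmn : m ≤ cs.length)
    (hp : sub <+: cs.drop m) (hmin : ∀ i, k ≤ i → i < m → ¬ sub <+: cs.drop i) :
    pvOccFrom cs sub k = (m : Int) :: pvOccFrom cs sub (m + 1) := by
  have hL : sub.length ≤ cs.length - m := by
    have := hp.length_le
    simp at this
    omega
  have hmN : m < cs.length + 1 - sub.length := by omega
  unfold pvOccFrom
  rw [show cs.length + 1 - sub.length = (m + 1) + (cs.length - sub.length - m) by omega,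
      List.range_add, List.filter_append, List.filter_append, List.range_succ,
      List.filter_append, List.filter_append]
  have h1 : (List.range m).filter (fun i => decide (k ≤ i) && decide (sub <+: cs.drop i)) = [] := by
    rw [List.filter_eq_nil_iff]
    intro i hi hdec
    simp at hi hdec
    exact hmin i hdec.1 hi hdec.2
  have h4 : (List.range m).filter (fun i => decide (m+1 ≤ i) && decide (sub <+: cs.drop i)) = [] := by
    rw [List.filter_eq_nil_iff]
    intro i hi hdec
    simp at hi hdec
    omega
  have h5 : ([m]).filter (fun i => decide (m+1 ≤ i) && decide (sub <+: cs.drop i)) = [] := by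
    simp
  have h2 : ([m]).filter (fun i => decide (k ≤ i) && decide (sub <+: cs.drop i)) = [m] := by
    simp [hkm, hp]
  have h3 : ∀ i ∈ (List.range (cs.length - sub.length - m)).map (fun j => (m+1) + j),
      (decide (k ≤ i) && decide (sub <+: cs.drop i)) = (decide (m+1 ≤ i) && decide (sub <+: cs.drop i)) := by
    intro i hi
    simp at hi
    obtain ⟨j, hj, rfl⟩ := hi
    simp [show k ≤ m+1+j by omega, show m+1 ≤ m+1+j by omega]
  rw [h1, h2, List.filter_congr h3, h4, h5]
  simp

theorem pvOcc_nil_ge {cs sub : List Char} {k : Nat} (h : cs.length + 1 - sub.length ≤ k) :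
    pvOccFrom cs sub k = [] := by
  unfold pvOccFrom
  rw [List.filter_eq_nil_iff.2, List.map_nil]
  intro i hi hdec
  simp at hi hdec
  omega

theorem loopA_eq (clean_text substring : String) (k : Nat)
    (hk : k ≤ clean_text.toList.length + 1) :
    findLoopA clean_text substring k = pvOccFrom clean_text.toList substring.toList k := by
  induction k using findLoopA.induct (clean_text := clean_text) (substring := substring) with
  | case1 k pos hpos =>
    rw [findLoopA, dif_pos hpos]
    simp only [pos, PySem.Str.findFrom_eq] at hpos
    by_cases hkn : k ≤ clean_text.toList.length
    · rw [PySem.Chars.findFrom_natCast_eq_neg_one_iff _ _ _ hkn] at hpos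
      exact (pvOcc_nil hpos).symm
    · refine (pvOcc_nil_ge ?_).symm
      by_cases hL : substring.toList.length = 0
      · -- empty pattern: findFrom = -1 forces k > length
        omega
      · omega
  | case2 k pos hpos ih =>
    rw [findLoopA, dif_neg hpos]
    simp only [pos, PySem.Str.findFrom_eq] at hpos ih ⊢
    have hb := pvFindFrom_bounds clean_text.toList substring.toList k hpos
    have hkn : k ≤ clean_text.toList.length := by
      by_contra hgt
      exact hpos (pvFindFrom_gt _ _ _ (by omega))
    have hspec := PySem.Chars.findFrom_natCast_spec clean_text.toList substring.toList k hkn hpos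
    set p := PySem.Chars.findFrom clean_text.toList substring.toList (k : Int) none with hpdef
    have hp0 : 0 ≤ p := le_trans (by positivity) hb.1
    have hcons := pvOcc_cons (cs := clean_text.toList) (sub := substring.toList)
      (k := k) (m := p.toNat) (by omega) (by omega) hspec.2.1
      (fun i h1 h2 => hspec.2.2 i h1 h2)
    rw [hcons, ih (by omega)]

-- Step 1: inner window pass, getD after the fold
theorem inner_getD (clean_text : String) (L : Int) (d : PySem.Dict String (List Int)) (sub : String) :
    ((PySem.List.pyRange 0 ((PySem.Str.len clean_text : Int) - L + 1) 1).foldl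
      (fun d i => d.modify (PySem.Str.slice clean_text (some i) (some (i + L))) [] (fun v => v ++ [i])) d).getD sub []
    = d.getD sub [] ++
      ((PySem.List.pyRange 0 ((PySem.Str.len clean_text : Int) - L + 1) 1).filter
        (fun i => PySem.Str.slice clean_text (some i) (some (i + L)) == sub)) := by
  have h1 : (PySem.List.pyRange 0 ((PySem.Str.len clean_text : Int) - L + 1) 1).foldl
      (fun d i => d.modify (PySem.Str.slice clean_text (some i) (some (i + L))) [] (fun v => v ++ [i])) d
    = ((PySem.List.pyRange 0 ((PySem.Str.len clean_text : Int) - L + 1) 1).map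
        (fun i => (PySem.Str.slice clean_text (some i) (some (i + L)), i))).foldl
      (fun d p => d.modify p.1 [] (fun v => v ++ [p.2])) d := by
    rw [List.foldl_map]
  rw [h1, PySem.Dict.getD_foldl_modify_append]
  congr 1
  rw [List.filter_map]
  simp [Function.comp_def]

theorem window_toList (ct : String) (iN m : Nat) :
    (PySem.Str.slice ct (some (iN : Int)) (some ((iN : Int) + (m : Int)))).toList
      = (ct.toList.drop iN).take m := by
  simp [PySem.List.slice_natCast_add]

theorem contrib_other (ct : String) (m : Nat) (sub : String) (hne : m ≠ sub.toList.length) :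
    (PySem.List.pyRange 0 ((PySem.Str.len ct : Int) - (m : Int) + 1) 1).filter
      (fun i => PySem.Str.slice ct (some i) (some (i + (m : Int))) == sub) = [] := by
  rw [List.filter_eq_nil_iff]
  intro i hi hdec
  rw [PySem.List.mem_pyRange_one] at hi
  simp only [beq_iff_eq] at hdec
  have h0 : (i.toNat : Int) = i := Int.toNat_of_nonneg hi.1
  have hlen : i.toNat + m ≤ ct.toList.length := by
    have h2 := hi.2
    rw [PySem.Str.len_eq] at h2
    omega
  have h3 := congrArg String.toList hdec
  rw [← h0, window_toList] at h3
  have hl := congrArg List.length h3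
  rw [List.length_take, List.length_drop] at hl
  omega

theorem contrib_self (ct sub : String) :
    (PySem.List.pyRange 0 ((PySem.Str.len ct : Int) - (sub.toList.length : Int) + 1) 1).filter
      (fun i => PySem.Str.slice ct (some i) (some (i + (sub.toList.length : Int))) == sub)
      = pvOccFrom ct.toList sub.toList 0 := by
  have hN : (((PySem.Str.len ct : Int) - (sub.toList.length : Int) + 1) - 0).toNat
      = ct.toList.length + 1 - sub.toList.length := by
    rw [PySem.Str.len_eq]
    omega
  rw [PySem.List.pyRange_one, List.filter_map, hN]
  unfold pvOccFrom
  simp only [zero_add, Function.comp_def]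
  congr 1
  apply List.filter_congr
  intro i hi
  rw [List.mem_range] at hi
  simp only [Nat.zero_le, decide_true, Bool.true_and]
  have hiff : (PySem.Str.slice ct (some (i:Int)) (some ((i:Int) + (sub.length : Int))) = sub)
      ↔ sub.toList <+: ct.toList.drop i := by
    rw [String.ext_iff, window_toList, List.prefix_iff_eq_take, String.length_toList]
    exact eq_comm
  rw [Bool.eq_iff_iff]
  simp [hiff]

theorem outer_getD (ct : String) (lens : List Int) (sub : String) :
    ∀ d : PySem.Dict String (List Int), lens.Nodup → (∀ L ∈ lens, ∃ m : Nat, L = (m : Int)) →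
    (lens.foldl
      (fun d L =>
        (PySem.List.pyRange 0 ((PySem.Str.len ct : Int) - L + 1) 1).foldl
          (fun d i => d.modify (PySem.Str.slice ct (some i) (some (i + L))) [] (fun v => v ++ [i]))
          d)
      d).getD sub []
    = d.getD sub [] ++
      (if ((sub.toList.length : Int)) ∈ lens then pvOccFrom ct.toList sub.toList 0 else []) := by
  induction lens with
  | nil => intro d _ _; simp
  | cons L rest ih =>
    intro d hnd hnat
    rw [List.foldl_cons, ih _ (by simp at hnd; exact hnd.2) (fun L' h => hnat L' (by simp [h])),
        inner_getD]
    obtain ⟨m, rfl⟩ := hnat L (by simp)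
    by_cases hm : m = sub.toList.length
    · subst hm
      rw [contrib_self]
      have hnotin : ((sub.toList.length : Int)) ∉ rest := by
        simp at hnd
        simpa using hnd.1
      have hnotin' : ((sub.length : Int)) ∉ rest := by simpa using hnotin
      simp [hnotin']
    · rw [contrib_other ct m sub hm]
      have : (((sub.toList.length : Int)) ∈ ((m : Int) :: rest)) ↔ ((sub.toList.length : Int)) ∈ rest := by
        simp
        intro h
        exact absurd (by exact_mod_cast h) (Ne.symm hm)
      simp only [List.append_nil]
      rw [if_congr this rfl rfl]

theorem lens_nat (items : List (String × Int)) :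
    ∀ acc : PySem.Set Int, (∀ L ∈ acc, ∃ m : Nat, L = (m : Int)) →
    ∀ L ∈ items.foldl
      (fun acc p => if p.2 > 1 then PySem.Set.add acc ((PySem.Str.len p.1 : Int)) else acc) acc,
      ∃ m : Nat, L = (m : Int) := by
  induction items with
  | nil => intro acc h; simpa using h
  | cons q rest ih =>
    intro acc h
    rw [List.foldl_cons]
    apply ih
    intro L hL
    by_cases hq : q.2 > 1
    · rw [if_pos hq] at hL
      rcases (PySem.Set.mem_add _ _ _).1 hL with h1 | h1
      · exact h L h1
      · exact ⟨q.1.toList.length, by rw [h1, PySem.Str.len_eq]⟩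
    · rw [if_neg hq] at hL
      exact h L hL

theorem lens_nodup (items : List (String × Int)) :
    ∀ acc : PySem.Set Int, acc.Nodup →
    (items.foldl
      (fun acc p => if p.2 > 1 then PySem.Set.add acc ((PySem.Str.len p.1 : Int)) else acc) acc).Nodup := by
  induction items with
  | nil => intro acc h; simpa using h
  | cons q rest ih =>
    intro acc h
    rw [List.foldl_cons]
    apply ih
    by_cases hq : q.2 > 1
    · rw [if_pos hq]; exact PySem.Set.nodup_add _ _ h
    · rw [if_neg hq]; exact h

theorem lens_mono (items : List (String × Int)) :
    ∀ (acc : PySem.Set Int) (L : Int), L ∈ acc →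
    L ∈ items.foldl
      (fun acc p => if p.2 > 1 then PySem.Set.add acc ((PySem.Str.len p.1 : Int)) else acc) acc := by
  induction items with
  | nil => intro acc L h; simpa using h
  | cons q rest ih =>
    intro acc L h
    rw [List.foldl_cons]
    apply ih
    by_cases hq : q.2 > 1
    · rw [if_pos hq]; exact (PySem.Set.mem_add _ _ _).2 (Or.inl h)
    · rw [if_neg hq]; exact h

theorem lens_mem (items : List (String × Int)) :
    ∀ (acc : PySem.Set Int) (p : String × Int), p ∈ items → p.2 > 1 →
    ((PySem.Str.len p.1 : Int)) ∈ items.foldl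
      (fun acc p => if p.2 > 1 then PySem.Set.add acc ((PySem.Str.len p.1 : Int)) else acc) acc := by
  induction items with
  | nil => intro acc p h; simp at h
  | cons q rest ih =>
    intro acc p hp hgt
    rw [List.foldl_cons]
    rcases List.mem_cons.1 hp with rfl | hmem
    · rw [if_pos hgt]
      exact lens_mono rest _ _ ((PySem.Set.mem_add _ _ _).2 (Or.inr rfl))
    · exact ih _ p hmem hgt

theorem altValue_eq (clean_text : String) (substrings_count : List (String × Int)) (sub : String)
    (hmem : PySem.Str.len sub ∈
      substrings_count.foldl
        (fun acc p => if p.2 > 1 then PySem.Set.add acc (PySem.Str.len p.1) else acc)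
        PySem.Set.empty) :
    PySem.Dict.getD
      ((substrings_count.foldl
          (fun acc p => if p.2 > 1 then PySem.Set.add acc (PySem.Str.len p.1) else acc)
          PySem.Set.empty).foldl
        (fun d L =>
          (PySem.List.pyRange 0 (PySem.Str.len clean_text - L + 1) 1).foldl
            (fun d i => d.modify (PySem.Str.slice clean_text (some i) (some (i + L))) [] (fun v => v ++ [i]))
            d)
        PySem.Dict.empty) sub []
      = pvOccFrom clean_text.toList sub.toList 0 := by
  have hout := outer_getD clean_text
    (substrings_count.foldl
      (fun acc p => if p.2 > 1 then PySem.Set.add acc (PySem.Str.len p.1) else acc)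
      PySem.Set.empty) sub PySem.Dict.empty
    (lens_nodup substrings_count PySem.Set.empty (by simp [PySem.Set.empty]))
    (lens_nat substrings_count PySem.Set.empty (by simp [PySem.Set.empty]))
  rw [hout, PySem.Dict.getD_empty, List.nil_append, if_pos (by rwa [← PySem.Str.len_eq])]

-- ===== VERDICT (by name: the statement is the Claim_ definition above) =====
theorem repeated_substrings_positions_spec : Claim_equal_repeated_substrings_positions := by
  intro clean_text substrings_count _
  unfold Spec_repeated_substrings_positions repeated_substrings_positions
  simp only [repeated_substrings_positions_alt]
  congr 1
  apply PySem.List.foldl_congr_mem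
  intro acc p hp
  by_cases hgt : p.2 > 1
  · rw [if_pos hgt, if_pos hgt]
    congr 1
    rw [loopA_eq clean_text p.1 0 (by omega), altValue_eq clean_text substrings_count p.1
      (lens_mem substrings_count PySem.Set.empty p hp hgt)]
  · rw [if_neg hgt, if_neg hgt]
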